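-- pv_equiv track=rewrite | github.com/turvik0/algorithms_mipt | week5_6/string.py | getnumbalance
-- ===== SOURCE A (Python) =====
-- def getnumbalance(adj_list):
--     numbalance = dict.fromkeys(adj_list.keys(), 0)
--     for node in adj_list.keys():
--         for out in adj_list[node]:
--             numbalance[node] -= 1
--             try:
--                 numbalance[out] += 1
--             except:
--                 numbalance[out] = 1
--     return numbalance
-- ===== SOURCE B (Python) =====
-- def getnumbalance(adj_list):
--     # Tabulate in-degrees in one edge pass, use len() as the closed-form
--     # out-degree, then combine; target-only nodes come from the in-degree table.
--     in_deg = {}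
--     for outs in adj_list.values():
--         for t in outs:
--             in_deg[t] = in_deg.get(t, 0) + 1
--     result = {n: in_deg.get(n, 0) - len(outs) for n, outs in adj_list.items()}
--     for t in in_deg:
--         if t not in result:
--             result[t] = in_deg[t]
--     return result
-- ===== Notes on version B (the rewrite author's own statement) =====
-- stated objective: alternative
-- what changed: Replaces A's fused per-edge increment/decrement loop with try/except by an in-degree tabulation pass over all edges, a closed-form len() out-degree per key in a dict comprehension, and a final pass adding target-only nodes from the in-degree table.
import Mathlib
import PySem

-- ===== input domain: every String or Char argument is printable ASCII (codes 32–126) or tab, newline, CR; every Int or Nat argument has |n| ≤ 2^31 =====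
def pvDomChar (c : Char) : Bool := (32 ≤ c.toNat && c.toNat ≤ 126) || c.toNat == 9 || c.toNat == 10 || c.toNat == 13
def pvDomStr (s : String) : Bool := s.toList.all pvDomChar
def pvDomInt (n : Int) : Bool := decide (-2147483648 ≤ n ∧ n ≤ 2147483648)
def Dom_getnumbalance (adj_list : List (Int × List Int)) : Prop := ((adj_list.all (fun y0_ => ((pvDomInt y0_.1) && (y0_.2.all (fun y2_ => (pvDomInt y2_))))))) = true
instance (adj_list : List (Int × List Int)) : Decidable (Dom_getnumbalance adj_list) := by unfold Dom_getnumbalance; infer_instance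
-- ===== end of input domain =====

-- B replaces A's fused per-edge increment/decrement loop by an in-degree tabulation pass,
-- a closed-form len() out-degree per key, and a combining pass (objective: alternative decomposition).

-- ===== PORT A =====
-- one edge step of A's inner loop: numbalance[node] -= 1; try numbalance[out] += 1 except: numbalance[out] = 1
def pvStepA (node : Int) (d : PySem.Dict Int Int) (out : Int) : PySem.Dict Int Int :=
  let d1 := d.modify node 0 (fun v => v - 1)
  if d1.contains out then d1.modify out 0 (fun v => v + 1) else d1.insert out 1

def getnumbalance (adj_list : List (Int × List Int)) : List (Int × Int) :=
  -- numbalance = dict.fromkeys(adj_list.keys(), 0)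
  let numbalance : PySem.Dict Int Int :=
    adj_list.foldl (fun d p => d.insert p.1 0) PySem.Dict.empty
  -- for node in adj_list.keys(): for out in adj_list[node]: …
  let numbalance := adj_list.foldl (fun d p => p.2.foldl (pvStepA p.1) d) numbalance
  numbalance.items

-- ===== PORT B =====
def getnumbalance_alt (adj_list : List (Int × List Int)) : List (Int × Int) :=
  -- in_deg = {}; for outs in adj_list.values(): for t in outs: in_deg[t] = in_deg.get(t, 0) + 1
  let in_deg : PySem.Dict Int Int :=
    adj_list.foldl (fun d p => p.2.foldl (fun d t => d.insert t (d.getD t 0 + 1)) d) PySem.Dict.empty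
  -- result = {n: in_deg.get(n, 0) - len(outs) for n, outs in adj_list.items()}
  let result : PySem.Dict Int Int :=
    adj_list.foldl (fun r p => r.insert p.1 (in_deg.getD p.1 0 - (p.2.length : Int))) PySem.Dict.empty
  -- for t in in_deg: if t not in result: result[t] = in_deg[t]
  let result := in_deg.keys.foldl
    (fun r t => if r.contains t then r else r.insert t (in_deg.getD t 0)) result
  result.items

-- ===== PRECONDITION & SPEC =====
-- Pre_ excludes association lists with duplicate keys: they do not represent a Python dict
-- (adj_list is a dict in A), so no behaviour of the Python is being claimed there.
def Pre_getnumbalance (adj_list : List (Int × List Int)) : Prop :=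
  (adj_list.map Prod.fst).Nodup

instance (adj_list : List (Int × List Int)) : Decidable (Pre_getnumbalance adj_list) := by
  unfold Pre_getnumbalance; infer_instance

def pvWitness_getnumbalance : (List (Int × List Int)) := [(1, [2, 1, 3]), (2, [])]

def Spec_getnumbalance (adj_list : List (Int × List Int)) (out : List (Int × Int)) : Prop := out = getnumbalance_alt adj_list
instance (adj_list : List (Int × List Int)) (out : List (Int × Int)) : Decidable (Spec_getnumbalance adj_list out) := by unfold Spec_getnumbalance; infer_instance

-- ===== CLAIM (what is proved, stated in full; the proofs are below) =====
def Claim_equal_getnumbalance : Prop := ∀ (adj_list : List (Int × List Int)), Dom_getnumbalance adj_list → Pre_getnumbalance adj_list → Spec_getnumbalance adj_list (getnumbalance adj_list)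

-- ===== LEMMAS AND PROOFS =====

-- total out-degree charged to k by the list of pairs
def pvOutsum (ps : List (Int × List Int)) (k : Int) : Int :=
  (ps.map (fun p => if p.1 = k then (p.2.length : Int) else 0)).sum

theorem pvOutsum_cons (p : Int × List Int) (ps : List (Int × List Int)) (k : Int) :
    pvOutsum (p :: ps) k = (if p.1 = k then (p.2.length : Int) else 0) + pvOutsum ps k := by
  simp [pvOutsum]

theorem pvOutsum_zero (ps : List (Int × List Int)) (k : Int)
    (h : k ∉ ps.map Prod.fst) : pvOutsum ps k = 0 := by
  induction ps with
  | nil => rfl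
  | cons p ps ih =>
    simp only [List.map_cons, List.mem_cons, not_or] at h
    rw [pvOutsum_cons, if_neg (fun hh => h.1 hh.symm), ih h.2, add_zero]

theorem pvOutsum_eq (ps : List (Int × List Int)) (p : Int × List Int)
    (hnd : (ps.map Prod.fst).Nodup) (hmem : p ∈ ps) :
    pvOutsum ps p.1 = (p.2.length : Int) := by
  induction ps with
  | nil => cases hmem
  | cons q ps ih =>
    simp only [List.map_cons, List.nodup_cons] at hnd
    rcases List.mem_cons.mp hmem with h | h
    · subst h
      rw [pvOutsum_cons, if_pos rfl, pvOutsum_zero _ _ hnd.1, add_zero]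
    · have hne : q.1 ≠ p.1 := by
        intro he
        exact hnd.1 (he ▸ List.mem_map_of_mem h)
      rw [pvOutsum_cons, if_neg hne, ih hnd.2 h, zero_add]

-- one A-step: the balance at k moves by +1 at out and −1 at node
theorem pvStepA_getD (node : Int) (d : PySem.Dict Int Int) (out k : Int) :
    (pvStepA node d out).getD k 0 =
      d.getD k 0 + (if k = out then 1 else 0) - (if k = node then 1 else 0) := by
  unfold pvStepA
  by_cases hc : (d.modify node 0 (fun v => v - 1)).contains out = true
  · simp only [hc, if_true, PySem.Dict.getD_modify]
    split_ifs <;> subst_vars <;> omega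
  · have hb : (out == node || d.contains out) = false := by
      rw [← PySem.Dict.contains_modify d node out 0 (fun v => v - 1)]
      exact Bool.eq_false_iff.mpr hc
    have h1 : out ≠ node := by
      intro he; simp [he] at hb
    have h2 : d.contains out = false := by
      simpa using (Bool.or_eq_false_iff.mp hb).2
    rw [if_neg hc, PySem.Dict.getD_insert, PySem.Dict.getD_modify]
    have h3 : d.getD out 0 = 0 := PySem.Dict.getD_of_not_contains d 0 h2
    split_ifs <;> subst_vars <;> omega

-- one A-step: the keys gain out (node already present)
theorem pvStepA_keys (node : Int) (d : PySem.Dict Int Int) (out : Int)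
    (h : node ∈ d.keys) :
    (pvStepA node d out).keys = PySem.Set.add d.keys out := by
  unfold pvStepA
  have hkm : (d.modify node 0 (fun v => v - 1)).keys = d.keys := by
    rw [PySem.Dict.keys_modify,
      PySem.Dict.keys_insert_of_contains _ _ ((PySem.Dict.contains_iff_mem_keys d node).mpr h)]
  by_cases hc : (d.modify node 0 (fun v => v - 1)).contains out = true
  · have hmem : out ∈ d.keys := by
      have := (PySem.Dict.contains_iff_mem_keys _ out).mp hc
      rwa [hkm] at this
    simp only [hc, if_true]
    rw [PySem.Dict.keys_modify,
      PySem.Dict.keys_insert_of_contains _ _ ((PySem.Dict.contains_iff_mem_keys _ out).mpr (hkm ▸ hmem)),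
      hkm, PySem.Set.add_of_mem hmem]
  · have hnm : out ∉ d.keys := by
      intro hmem
      exact hc ((PySem.Dict.contains_iff_mem_keys _ out).mpr (hkm ▸ hmem))
    rw [if_neg hc, PySem.Dict.keys_insert_of_not_contains _ _ (Bool.eq_false_iff.mpr hc), hkm,
      PySem.Set.add_of_not_mem hnm]

theorem pvInnerA_getD (node : Int) (outs : List Int) (k : Int) :
    ∀ d : PySem.Dict Int Int,
      (outs.foldl (pvStepA node) d).getD k 0 =
        d.getD k 0 + (outs.count k : Int) - (if k = node then (outs.length : Int) else 0) := by
  induction outs with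
  | nil => intro d; simp
  | cons o outs ih =>
    intro d
    rw [List.foldl_cons, ih, pvStepA_getD]
    simp only [List.count_cons, List.length_cons, beq_iff_eq]
    push_cast
    split_ifs <;> subst_vars <;> omega

theorem pvInnerA_keys (node : Int) (outs : List Int) :
    ∀ d : PySem.Dict Int Int, node ∈ d.keys →
      (outs.foldl (pvStepA node) d).keys = PySem.Set.update d.keys outs := by
  induction outs with
  | nil => intro d _; rfl
  | cons o outs ih =>
    intro d h
    rw [List.foldl_cons, PySem.Set.update_cons, ← pvStepA_keys node d o h]
    exact ih _ (by rw [pvStepA_keys node d o h]; exact (PySem.Set.mem_add _ _ _).mpr (Or.inl h))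

theorem pvOuterA_getD (ps : List (Int × List Int)) (k : Int) :
    ∀ d : PySem.Dict Int Int,
      (ps.foldl (fun d p => p.2.foldl (pvStepA p.1) d) d).getD k 0 =
        d.getD k 0 + ((ps.flatMap Prod.snd).count k : Int) - pvOutsum ps k := by
  induction ps with
  | nil => intro d; simp [pvOutsum]
  | cons p ps ih =>
    intro d
    rw [List.foldl_cons, ih, pvInnerA_getD, pvOutsum_cons]
    simp only [List.flatMap_cons, List.count_append]
    push_cast
    split_ifs <;> omega

theorem pvOuterA_keys (ps : List (Int × List Int)) :
    ∀ d : PySem.Dict Int Int, (∀ p ∈ ps, p.1 ∈ d.keys) →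
      (ps.foldl (fun d p => p.2.foldl (pvStepA p.1) d) d).keys =
        PySem.Set.update d.keys (ps.flatMap Prod.snd) := by
  induction ps with
  | nil => intro d _; rfl
  | cons p ps ih =>
    intro d h
    rw [List.foldl_cons, List.flatMap_cons, PySem.Set.update_append,
      ← pvInnerA_keys p.1 p.2 d (h p (List.mem_cons_self))]
    refine ih _ (fun q hq => ?_)
    rw [pvInnerA_keys p.1 p.2 d (h p (List.mem_cons_self))]
    exact (PySem.Set.mem_update _ _ _).mpr (Or.inl (h q (List.mem_cons_of_mem _ hq)))

theorem pvInitA_getD (ps : List (Int × List Int)) (k : Int) :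
    ∀ d : PySem.Dict Int Int, (∀ k', d.getD k' 0 = 0) →
      (ps.foldl (fun d p => d.insert p.1 0) d).getD k 0 = 0 := by
  induction ps with
  | nil => intro d h; exact h k
  | cons p ps ih =>
    intro d h
    rw [List.foldl_cons]
    refine ih _ (fun k' => ?_)
    rw [PySem.Dict.getD_insert]
    split_ifs <;> simp [h]

theorem pvIndeg_getD (ps : List (Int × List Int)) (k : Int) :
    ∀ d : PySem.Dict Int Int,
      (ps.foldl (fun d p => p.2.foldl (fun d t => d.insert t (d.getD t 0 + 1)) d) d).getD k 0 =
        d.getD k 0 + ((ps.flatMap Prod.snd).count k : Int) := by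
  induction ps with
  | nil => intro d; simp
  | cons p ps ih =>
    intro d
    rw [List.foldl_cons, ih, PySem.Dict.getD_foldl_insert_add_one]
    simp only [List.flatMap_cons, List.count_append]
    push_cast
    ring

theorem pvIndeg_keys (ps : List (Int × List Int)) :
    ∀ d : PySem.Dict Int Int,
      (ps.foldl (fun d p => p.2.foldl (fun d t => d.insert t (d.getD t 0 + 1)) d) d).keys =
        PySem.Set.update d.keys (ps.flatMap Prod.snd) := by
  induction ps with
  | nil => intro d; rfl
  | cons p ps ih =>
    intro d
    rw [List.foldl_cons, ih, PySem.Dict.keys_foldl_insert, List.flatMap_cons,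
      PySem.Set.update_append]

-- the skip-if-present fold appends exactly the fresh keys
theorem pvTail_items (v : Int → Int) (ts : List Int) :
    ∀ r : PySem.Dict Int Int, ts.Nodup →
      (ts.foldl (fun r t => if r.contains t then r else r.insert t (v t)) r).items =
        r.items ++ (ts.filter (fun t => !(r.contains t))).map (fun t => (t, v t)) := by
  induction ts with
  | nil => intro r _; simp
  | cons t ts ih =>
    intro r hnd
    rw [List.nodup_cons] at hnd
    by_cases hc : r.contains t = true
    · simp only [List.foldl_cons, hc, if_true]
      rw [ih r hnd.2, List.filter_cons_of_neg (by simp [hc])]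
    · have hc' : r.contains t = false := Bool.eq_false_iff.mpr hc
      simp only [List.foldl_cons, hc', Bool.false_eq_true, if_false]
      rw [List.filter_cons_of_pos (by simp [hc']),
        ih _ hnd.2, PySem.Dict.items_insert_of_not_contains _ _ hc']
      have hfil : ts.filter (fun x => !((r.insert t (v t)).contains x)) =
          ts.filter (fun x => !(r.contains x)) := by
        refine List.filter_congr (fun x hx => ?_)
        rw [PySem.Dict.contains_insert]
        have : (x == t) = false := by
          simp only [beq_eq_false_iff_ne, ne_eq]
          intro he; exact hnd.1 (he ▸ hx)
        rw [this, Bool.false_or]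
      rw [hfil]
      simp

theorem pvMain (adj : List (Int × List Int)) (hpre : (adj.map Prod.fst).Nodup)
    (indeg res1 : PySem.Dict Int Int)
    (hindeg : indeg =
      adj.foldl (fun d p => p.2.foldl (fun d t => d.insert t (d.getD t 0 + 1)) d) PySem.Dict.empty)
    (hres1 : res1 =
      adj.foldl (fun r p => r.insert p.1 (indeg.getD p.1 0 - (p.2.length : Int))) PySem.Dict.empty) :
    (adj.foldl (fun d p => p.2.foldl (pvStepA p.1) d)
       (adj.foldl (fun d p => d.insert p.1 0) PySem.Dict.empty)).items =
    (indeg.keys.foldl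
      (fun r t => if r.contains t then r else r.insert t (indeg.getD t 0)) res1).items := by
  set K := adj.map Prod.fst with hK
  set E := adj.flatMap Prod.snd with hE
  set init : PySem.Dict Int Int := adj.foldl (fun d p => d.insert p.1 0) PySem.Dict.empty with hinit
  set Afin : PySem.Dict Int Int := adj.foldl (fun d p => p.2.foldl (pvStepA p.1) d) init with hAfin
  -- characterisations
  have hinitK : init.keys = K := by
    rw [hinit, PySem.Dict.keys_foldl_insert_key adj Prod.fst (fun _ _ => 0) PySem.Dict.empty,
      PySem.Dict.keys_empty, PySem.Set.update_nil_left, hK,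
      PySem.Set.ofList_eq_self_of_nodup _ hpre]
  have hAkeys : Afin.keys = PySem.Set.update K E := by
    rw [hAfin, pvOuterA_keys adj init (fun p hp => by rw [hinitK]; exact List.mem_map_of_mem hp),
      hinitK, hE]
  have hAnodup : Afin.keys.Nodup := by
    rw [hAkeys]; exact PySem.Set.nodup_update _ _ hpre
  have hAgetD : ∀ k, Afin.getD k 0 = ((E.count k : Int)) - pvOutsum adj k := by
    intro k
    rw [hAfin, pvOuterA_getD,
      pvInitA_getD adj k PySem.Dict.empty (fun k' => PySem.Dict.getD_empty k' 0), hE]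
    ring
  have hIgetD : ∀ k, indeg.getD k 0 = (E.count k : Int) := by
    intro k
    rw [hindeg, pvIndeg_getD, PySem.Dict.getD_empty, hE]
    ring
  have hIkeys : indeg.keys = PySem.Set.ofList E := by
    rw [hindeg, pvIndeg_keys, PySem.Dict.keys_empty, PySem.Set.update_nil_left, hE]
  have hres1items : res1.items = adj.map (fun p => (p.1, indeg.getD p.1 0 - (p.2.length : Int))) := by
    rw [hres1, PySem.Dict.items_foldl_insert_fresh adj Prod.fst
      (fun p => indeg.getD p.1 0 - (p.2.length : Int)) PySem.Dict.empty
      (fun p _ => PySem.Dict.contains_empty p.1) hpre]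
    rfl
  have hres1keys : res1.keys = K := by
    show res1.items.map Prod.fst = K
    rw [hres1items, List.map_map, hK]
    rfl
  have hres1contains : ∀ t, res1.contains t = decide (t ∈ K) := by
    intro t
    rw [PySem.Dict.contains_eq_decide_mem_keys, hres1keys]
  -- assemble
  rw [PySem.Dict.items_eq_map_keys Afin hAnodup 0, hAkeys,
    PySem.Set.update_eq_append_filter, List.map_append, hIkeys,
    pvTail_items _ _ res1 (PySem.Set.nodup_ofList E), hres1items]
  congr 1
  · rw [hK, List.map_map]
    refine List.map_congr_left (fun p hp => ?_)
    have : pvOutsum adj p.1 = (p.2.length : Int) := pvOutsum_eq adj p hpre hp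
    simp only [Function.comp_apply, hAgetD, hIgetD, this]
  · have hfil : (PySem.Set.ofList E).filter (fun y => !(PySem.Set.contains K y)) =
        (PySem.Set.ofList E).filter (fun t => !(res1.contains t)) := by
      refine List.filter_congr (fun y _ => ?_)
      rw [hres1contains]
      simp
    rw [hfil]
    refine List.map_congr_left (fun t ht => ?_)
    have hpred := (List.mem_filter.mp ht).2
    have htK : t ∉ K := by
      rw [hres1contains] at hpred
      simpa using hpred
    rw [hAgetD, hIgetD, pvOutsum_zero adj t (hK ▸ htK), sub_zero]

-- ===== VERDICT (by name: the statement is the Claim_ definition above) =====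
theorem getnumbalance_spec : Claim_equal_getnumbalance := by
  intro adj_list _hdom hpre
  unfold Spec_getnumbalance getnumbalance getnumbalance_alt
  exact pvMain adj_list hpre _ _ rfl rfl
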